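-- pv_equiv track=rewrite | github.com/biochunan/find_contacts_pymol_plugin | cal_chain_dist_pymol.py | create_chain_pairs
-- ===== SOURCE A (Python) =====
-- from typing import Any, Dict, Generator, List, Optional, Tuple, Union
--
-- def create_chain_pairs(
--     receptor_chain_labels: List[str], ligand_chain_labels: List[str]
-- ):
--     """
--     Get all possible chain pairs.
--     e.g. receptor_chain_labels = ["H", "L"], ligand_chain_labels = ["A", "B"]
--     chain_pairs = [("H", "A"), ("H", "B"), ("L", "A"), ("L", "B")]
--
--     Args:
--         receptor_chain_labels (List[str]): Receptor chain labels.
--         ligand_chain_labels (List[str]): Ligand chain labels.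
--
--     Returns:
--         List[Tuple[str, str]]: List of chain pairs.
--     """
--     chain_pairs: List[Tuple[str, str]] = sorted(
--         set(
--             sorted(
--                 tuple([r, l])
--                 for r in receptor_chain_labels
--                 for l in ligand_chain_labels
--                 if r != l
--             )
--         )
--     )
--     return chain_pairs
-- ===== SOURCE B (Python) =====
-- from typing import List, Tuple
--
--
-- def create_chain_pairs(
--     receptor_chain_labels: List[str], ligand_chain_labels: List[str]
-- ):
--     # Dedup+sort each input once, then emit pairs directly in final order:
--     # the nested loop over pre-sorted, deduplicated labels already yields
--     # duplicate-free, lexicographically sorted pairs, so no trailing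
--     # set()/sorted() pass is needed.
--     rs = sorted(set(receptor_chain_labels))
--     ls = sorted(set(ligand_chain_labels))
--     return [(r, l) for r in rs for l in ls if r != l]
-- ===== Notes on version B (the rewrite author's own statement) =====
-- stated objective: faster
-- what changed: B sorts and deduplicates each label list once up front and then emits the pairs directly in final lexicographic order by a single ordered nested pass, instead of A's build-all-pairs, sort, set-dedup, re-sort pipeline.
import Mathlib
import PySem

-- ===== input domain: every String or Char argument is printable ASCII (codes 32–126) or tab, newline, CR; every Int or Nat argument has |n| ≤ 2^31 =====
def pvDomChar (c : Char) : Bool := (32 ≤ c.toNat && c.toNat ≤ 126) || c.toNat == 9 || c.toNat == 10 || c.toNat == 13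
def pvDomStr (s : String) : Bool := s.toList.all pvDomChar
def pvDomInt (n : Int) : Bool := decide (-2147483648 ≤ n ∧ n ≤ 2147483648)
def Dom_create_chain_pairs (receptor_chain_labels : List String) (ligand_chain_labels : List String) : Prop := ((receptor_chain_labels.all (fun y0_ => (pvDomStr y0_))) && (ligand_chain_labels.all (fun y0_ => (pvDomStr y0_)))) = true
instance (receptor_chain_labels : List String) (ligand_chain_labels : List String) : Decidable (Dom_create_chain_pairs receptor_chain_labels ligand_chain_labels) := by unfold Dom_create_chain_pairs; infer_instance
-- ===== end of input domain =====

-- B sorts and deduplicates each label list once, then emits the pairs directly in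
-- final order by one ordered nested pass (objective: faster — sorting only the label lists avoids sorting the n*m pair list).

-- ===== PORT A =====
-- sorted(set(sorted(generator of (r, l) pairs with r != l)))
def create_chain_pairs (receptor_chain_labels : List String) (ligand_chain_labels : List String) : List (String × String) :=
  let pairs : List (String × String) :=
    receptor_chain_labels.flatMap (fun r =>
      (ligand_chain_labels.filter (fun l => !(r == l))).map (fun l => (r, l)))
  PySem.List.sorted2
    (PySem.Set.ofList (PySem.List.sorted2 pairs Prod.fst Prod.snd))
    Prod.fst Prod.snd

-- ===== PORT B =====
def create_chain_pairs_alt (receptor_chain_labels : List String) (ligand_chain_labels : List String) : List (String × String) :=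
  let rs := PySem.List.sorted (PySem.Set.ofList receptor_chain_labels) (fun x => x)
  let ls := PySem.List.sorted (PySem.Set.ofList ligand_chain_labels) (fun x => x)
  rs.flatMap (fun r => (ls.filter (fun l => !(r == l))).map (fun l => (r, l)))

-- ===== PRECONDITION & SPEC =====
def Spec_create_chain_pairs (receptor_chain_labels : List String) (ligand_chain_labels : List String) (out : List (String × String)) : Prop := out = create_chain_pairs_alt receptor_chain_labels ligand_chain_labels
instance (receptor_chain_labels : List String) (ligand_chain_labels : List String) (out : List (String × String)) : Decidable (Spec_create_chain_pairs receptor_chain_labels ligand_chain_labels out) := by unfold Spec_create_chain_pairs; infer_instance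

-- ===== CLAIM (what is proved, stated in full; the proofs are below) =====
def Claim_equal_create_chain_pairs : Prop := ∀ (receptor_chain_labels : List String) (ligand_chain_labels : List String), Dom_create_chain_pairs receptor_chain_labels ligand_chain_labels → Spec_create_chain_pairs receptor_chain_labels ligand_chain_labels (create_chain_pairs receptor_chain_labels ligand_chain_labels)

-- ===== LEMMAS AND PROOFS =====

-- Python's comparison of string 2-tuples, as a Bool (the comparison sorted2 uses).
def pvLexB (a b : String × String) : Bool :=
  decide (a.1 < b.1) || (!decide (b.1 < a.1) && decide (a.2 < b.2))

-- The strict lexicographic order on string pairs, as a Prop.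
def pvLex (a b : String × String) : Prop := a.1 < b.1 ∨ (a.1 = b.1 ∧ a.2 < b.2)

theorem pvLexB_true_iff (a b : String × String) : pvLexB a b = true ↔ pvLex a b := by
  unfold pvLexB pvLex
  simp only [Bool.or_eq_true, Bool.and_eq_true, Bool.not_eq_true', decide_eq_true_eq,
    decide_eq_false_iff_not]
  constructor
  · rintro (h | ⟨h1, h2⟩)
    · exact Or.inl h
    · by_cases h3 : a.1 < b.1
      · exact Or.inl h3
      · exact Or.inr ⟨le_antisymm (le_of_not_gt h1) (le_of_not_gt h3), h2⟩
  · rintro (h | ⟨h1, h2⟩)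
    · exact Or.inl h
    · exact Or.inr ⟨fun hlt => lt_irrefl _ (h1 ▸ hlt), h2⟩

theorem pvLexB_false_iff (a b : String × String) : pvLexB a b = false ↔ ¬ pvLex a b := by
  rw [← pvLexB_true_iff, Bool.eq_false_iff]

theorem pvLex_trans {a b c : String × String} (h1 : pvLex a b) (h2 : pvLex b c) : pvLex a c := by
  rcases h1 with h1 | ⟨e1, l1⟩ <;> rcases h2 with h2 | ⟨e2, l2⟩
  · exact Or.inl (lt_trans h1 h2)
  · exact Or.inl (e2 ▸ h1)
  · exact Or.inl (e1 ▸ h2)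
  · exact Or.inr ⟨e1.trans e2, lt_trans l1 l2⟩

theorem pvLex_irrefl (a : String × String) : ¬ pvLex a a := by
  rintro (h | ⟨_, h⟩) <;> exact lt_irrefl _ h

theorem pvLex_antisymm {a b : String × String} (h1 : ¬ pvLex b a) (h2 : ¬ pvLex a b) : a = b := by
  unfold pvLex at h1 h2
  push_neg at h1 h2
  have hf : a.1 = b.1 := le_antisymm h1.1 h2.1
  have hs : a.2 = b.2 := le_antisymm (h1.2 hf.symm) (h2.2 hf)
  exact Prod.ext hf hs

-- insertBy with the lexicographic test preserves "no later element is pvLex-below an earlier one".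
theorem insertBy_pairwise_not_lex (x : String × String) (ys : List (String × String))
    (h : ys.Pairwise (fun a b => ¬ pvLex b a)) :
    (PySem.List.insertBy pvLexB x ys).Pairwise (fun a b => ¬ pvLex b a) := by
  induction ys with
  | nil => simp [PySem.List.insertBy]
  | cons y t ih =>
    rcases List.pairwise_cons.mp h with ⟨hy, ht⟩
    rw [PySem.List.insertBy]
    by_cases hb : pvLexB x y = true
    · simp only [hb, if_true]
      have hxy' : pvLex x y := (pvLexB_true_iff x y).mp hb
      refine List.pairwise_cons.mpr ⟨?_, h⟩
      intro z hz
      rcases List.mem_cons.mp hz with rfl | hz'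
      · exact fun hyx => pvLex_irrefl x (pvLex_trans hxy' hyx)
      · exact fun hzx => hy _ hz' (pvLex_trans hzx hxy')
    · have hb' : pvLexB x y = false := by simpa using hb
      simp only [hb]
      refine List.pairwise_cons.mpr ⟨?_, ih ht⟩
      intro z hz
      rcases (PySem.List.mem_insertBy pvLexB x z t).mp hz with heq | hz'
      · intro hc; exact (pvLexB_false_iff x y).mp hb' (heq ▸ hc)
      · exact hy _ hz'

theorem foldl_insertBy_pairwise_not_lex (xs acc : List (String × String))
    (h : acc.Pairwise (fun a b => ¬ pvLex b a)) :
    (xs.foldl (fun acc x => PySem.List.insertBy pvLexB x acc) acc).Pairwise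
      (fun a b => ¬ pvLex b a) := by
  induction xs generalizing acc with
  | nil => simpa using h
  | cons x t ih => exact ih _ (insertBy_pairwise_not_lex x acc h)

-- Characterisation of Python's sorted on string pairs: any pvLex-increasing
-- rearrangement of xs IS sorted2 xs fst snd.
theorem sorted2_eq_of_perm_of_pairwise_lex (xs ys : List (String × String))
    (hperm : ys.Perm xs) (hsort : ys.Pairwise pvLex) :
    PySem.List.sorted2 xs Prod.fst Prod.snd = ys := by
  have hdef : PySem.List.sorted2 xs Prod.fst Prod.snd
      = xs.foldl (fun acc x => PySem.List.insertBy pvLexB x acc) [] := rfl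
  rw [hdef]
  refine List.eq_of_perm_of_sorted (le := fun a b => ¬ pvLex b a) ?_ ?_ ?_ ?_
  · intro a b _ _ h1 h2
    exact pvLex_antisymm h1 h2
  · exact foldl_insertBy_pairwise_not_lex xs [] List.Pairwise.nil
  · exact hsort.imp (fun {a b} h hba => pvLex_irrefl a (pvLex_trans h hba))
  · exact ((PySem.List.foldl_insertBy_perm pvLexB xs []).trans (by simp)).trans hperm.symm

-- membership in the nested-pass pair list
theorem mem_pairList (R L : List String) (p : String × String) :
    p ∈ R.flatMap (fun r => (L.filter (fun l => !(r == l))).map (fun l => (r, l)))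
      ↔ p.1 ∈ R ∧ p.2 ∈ L ∧ p.1 ≠ p.2 := by
  rcases p with ⟨a, b⟩
  simp [List.mem_flatMap, List.mem_filter, List.mem_map]

-- B's output is strictly pvLex-increasing
theorem alt_pairwise_lex (R L : List String) :
    (create_chain_pairs_alt R L).Pairwise pvLex := by
  unfold create_chain_pairs_alt
  rw [List.pairwise_flatMap]
  refine ⟨?_, ?_⟩
  · intro r _
    rw [List.pairwise_map]
    refine ((PySem.List.sorted_ofList_pairwise_lt L).filter (fun l => !(r == l))).imp ?_
    intro a b h
    exact Or.inr ⟨rfl, h⟩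
  · refine (PySem.List.sorted_ofList_pairwise_lt R).imp ?_
    intro r1 r2 h x hx y hy
    rcases List.mem_map.mp hx with ⟨l1, _, rfl⟩
    rcases List.mem_map.mp hy with ⟨l2, _, rfl⟩
    exact Or.inl h

theorem alt_nodup (R L : List String) : (create_chain_pairs_alt R L).Nodup := by
  refine (alt_pairwise_lex R L).imp ?_
  intro a b h heq
  exact pvLex_irrefl a (heq ▸ h)

theorem mem_alt (R L : List String) (p : String × String) :
    p ∈ create_chain_pairs_alt R L ↔ p.1 ∈ R ∧ p.2 ∈ L ∧ p.1 ≠ p.2 := by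
  unfold create_chain_pairs_alt
  rw [mem_pairList]
  simp [PySem.List.mem_sorted, PySem.Set.mem_ofList]

-- ===== VERDICT (by name: the statement is the Claim_ definition above) =====
theorem create_chain_pairs_spec : Claim_equal_create_chain_pairs := by
  intro R L _
  unfold Spec_create_chain_pairs
  show create_chain_pairs R L = create_chain_pairs_alt R L
  unfold create_chain_pairs
  apply sorted2_eq_of_perm_of_pairwise_lex
  · rw [List.perm_ext_iff_of_nodup (alt_nodup R L) (PySem.Set.nodup_ofList _)]
    intro p
    rw [mem_alt, PySem.Set.mem_ofList, (PySem.List.sorted2_perm _ _ _ _).mem_iff,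
      mem_pairList]
  · exact alt_pairwise_lex R L
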